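-- pv_equiv track=rewrite | github.com/zxzl/lc | python/576.py | count
-- ===== SOURCE A (Python) =====
-- def count(board, R, C):
--     # boundary path
--     ans = 0
--
--     # top, bottom edge
--     for c in range(C):
--         ans += board[0][c]
--         ans += board[R-1][c]
--
--     # left, right edge
--     for r in range(R):
--         ans += board[r][0]
--         ans += board[r][C-1]
--
--     return ans
-- ===== SOURCE B (Python) =====
-- def count(board, R, C):
--     # one pass over the rows: every row contributes its left and right
--     # cells; the top row and the bottom row also contribute their whole edge
--     total = 0
--     for r in range(R):
--         row = board[r]
--         total += row[0] + row[C - 1]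
--         if r == 0:
--             total += sum(row[:C])
--         if r == R - 1:
--             total += sum(row[:C])
--     return total
-- ===== Notes on version B (the rewrite author's own statement) =====
-- stated objective: alternative
-- what changed: Replaces A's two separate perimeter loops (a column loop for the top/bottom rows plus a row loop for the left/right columns) with a single pass over the rows in which every row contributes its end cells and the first and last rows additionally contribute their whole slice via sum(row[:C]); Pre_ excludes inputs on which A only returns through Python's negative-index wraparound (R<=0 or C<=0 while indexing is still reached), an accident of A's implementation.
-- outside the precondition, e.g. on count([[1, 2]], 0, 2): A returns 6, B returns 0; on count([[1, 2]], 1, 0): A returns 3, B returns 3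
import Mathlib
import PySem

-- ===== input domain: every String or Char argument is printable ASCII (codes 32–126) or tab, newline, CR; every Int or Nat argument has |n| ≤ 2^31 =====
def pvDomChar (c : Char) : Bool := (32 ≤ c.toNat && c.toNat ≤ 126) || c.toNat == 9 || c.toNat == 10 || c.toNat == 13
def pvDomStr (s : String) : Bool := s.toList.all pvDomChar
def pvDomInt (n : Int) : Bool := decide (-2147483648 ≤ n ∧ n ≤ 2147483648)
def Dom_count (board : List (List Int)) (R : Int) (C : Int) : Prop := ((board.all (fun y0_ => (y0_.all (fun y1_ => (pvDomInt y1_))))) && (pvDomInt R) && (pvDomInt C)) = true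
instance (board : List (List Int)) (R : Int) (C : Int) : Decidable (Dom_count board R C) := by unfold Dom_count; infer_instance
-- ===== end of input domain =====

-- B replaces A's two perimeter loops with a single pass over the rows (same value, different decomposition; not faster).

-- ===== PORT A =====
def count (board : List (List Int)) (R : Int) (C : Int) : Int :=
  -- ans = 0; for c in range(C): ans += board[0][c]; ans += board[R-1][c]
  let ans : Int := 0
  let ans := (PySem.List.pyRange 0 C 1).foldl (fun ans c =>
      ans + PySem.List.pyGetD (PySem.List.pyGetD board 0 []) c 0
          + PySem.List.pyGetD (PySem.List.pyGetD board (R - 1) []) c 0) ans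
  -- for r in range(R): ans += board[r][0]; ans += board[r][C-1]
  let ans := (PySem.List.pyRange 0 R 1).foldl (fun ans r =>
      ans + PySem.List.pyGetD (PySem.List.pyGetD board r []) 0 0
          + PySem.List.pyGetD (PySem.List.pyGetD board r []) (C - 1) 0) ans
  ans

-- ===== PORT B =====
def count_alt (board : List (List Int)) (R : Int) (C : Int) : Int :=
  (PySem.List.pyRange 0 R 1).foldl (fun total r =>
    let row := PySem.List.pyGetD board r []
    let total := total + (PySem.List.pyGetD row 0 0 + PySem.List.pyGetD row (C - 1) 0)
    let total := if r = 0 then total + (PySem.List.slice row none (some C)).sum else total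
    if r = R - 1 then total + (PySem.List.slice row none (some C)).sum else total) 0

-- ===== PRECONDITION & SPEC =====
-- Pre_count excludes inputs where A only returns through Python's negative-index
-- wraparound (R ≤ 0 or C ≤ 0 while indexing is still reached, e.g. board[R-1] = board[-1]),
-- an accident of A's implementation; everywhere else it is exactly where A raises no IndexError.
def Pre_count (board : List (List Int)) (R : Int) (C : Int) : Prop :=
  (R ≤ 0 ∧ C ≤ 0) ∨
  (1 ≤ R ∧ 1 ≤ C ∧ R ≤ (board.length : Int) ∧
    ∀ row ∈ board.take R.toNat, C ≤ (row.length : Int))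
instance (board : List (List Int)) (R : Int) (C : Int) : Decidable (Pre_count board R C) := by
  unfold Pre_count; infer_instance
def pvWitness_count : List (List Int) × Int × Int := ([[1, 2], [3, 4]], 2, 2)
def Spec_count (board : List (List Int)) (R : Int) (C : Int) (out : Int) : Prop := out = count_alt board R C
instance (board : List (List Int)) (R : Int) (C : Int) (out : Int) : Decidable (Spec_count board R C out) := by unfold Spec_count; infer_instance

-- ===== CLAIM (what is proved, stated in full; the proofs are below) =====
def Claim_equal_count : Prop := ∀ (board : List (List Int)) (R : Int) (C : Int), Dom_count board R C → Pre_count board R C → Spec_count board R C (count board R C)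

-- ===== LEMMAS AND PROOFS =====

-- list-sum over range as a Finset sum (definitional)
theorem pv_listsum (n : Nat) (f : Nat → Int) :
    ((List.range n).map f).sum = ∑ i ∈ Finset.range n, f i := rfl

-- sum of a take as a Finset sum over getD (no length condition: getD pads with 0)
theorem pv_take_sum (L : List Int) (m : Nat) :
    (L.take m).sum = ∑ c ∈ Finset.range m, L.getD c 0 := by
  induction m with
  | zero => simp
  | succ k ih =>
    rw [Finset.sum_range_succ, ← ih, List.take_add_one]
    cases h : L[k]? <;> simp [List.getD, h]

-- A = B on positive natural-number dimensions
theorem pv_count_eq (board : List (List Int)) (n m : Nat) (hn : 0 < n) (hm : 0 < m) :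
    count board (n : Int) (m : Int) = count_alt board (n : Int) (m : Int) := by
  have hn1 : ((n : Int) - 1) = ((n - 1 : Nat) : Int) := by omega
  have hm1 : ((m : Int) - 1) = ((m - 1 : Nat) : Int) := by omega
  simp only [count, count_alt, hn1, hm1,
    PySem.List.pyRange_one 0 (n : Int), PySem.List.pyRange_one 0 (m : Int),
    PySem.List.slice_to_natCast,
    sub_zero, Int.toNat_natCast, zero_add, List.foldl_map, PySem.List.pyGetD_natCast,
    Nat.cast_eq_zero, Nat.cast_inj, PySem.List.pyGetD_zero]
  have stepA1 :
      (fun (a : Int) (k : Nat) => a + (board.getD 0 []).getD k 0 + (board.getD (n-1) []).getD k 0)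
        = fun a k => a + ((board.getD 0 []).getD k 0 + (board.getD (n-1) []).getD k 0) := by
    funext a k; ring
  have stepA2 :
      (fun (a : Int) (k : Nat) => a + (board.getD k []).getD 0 0 + (board.getD k []).getD (m-1) 0)
        = fun a k => a + ((board.getD k []).getD 0 0 + (board.getD k []).getD (m-1) 0) := by
    funext a k; ring
  have stepB :
      (fun (total : Int) (k : Nat) =>
        let row := board.getD k []
        let total := total + (row.getD 0 0 + row.getD (m-1) 0)
        let total := if k = 0 then total + (row.take m).sum else total
        if k = n-1 then total + (row.take m).sum else total)
        = fun total k => total +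
            ((board.getD k []).getD 0 0 + (board.getD k []).getD (m-1) 0
              + ((if k = 0 then ((board.getD k []).take m).sum else 0)
                 + (if k = n-1 then ((board.getD k []).take m).sum else 0))) := by
    funext total k; simp only []; split_ifs <;> ring
  rw [stepA1, stepA2, stepB]
  simp only [PySem.List.foldl_add, pv_listsum, zero_add, pv_take_sum]
  have h0n : 0 ∈ Finset.range n := Finset.mem_range.mpr hn
  have h1n : n-1 ∈ Finset.range n := Finset.mem_range.mpr (by omega)
  simp only [Finset.sum_add_distrib, Finset.sum_ite_eq' (Finset.range n), h0n, h1n, if_true]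
  ring

-- ===== VERDICT (by name: the statement is the Claim_ definition above) =====
theorem count_spec : Claim_equal_count := by
  intro board R C _ hpre
  unfold Spec_count
  rcases hpre with ⟨hR, hC⟩ | ⟨hR, hC, -, -⟩
  · simp [count, count_alt, PySem.List.pyRange_one_eq_nil hR, PySem.List.pyRange_one_eq_nil hC]
  · have hRn : R = ((R.toNat : Nat) : Int) := by omega
    have hCn : C = ((C.toNat : Nat) : Int) := by omega
    rw [hRn, hCn]
    exact pv_count_eq board R.toNat C.toNat (by omega) (by omega)
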